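-- pv_equiv track=rewrite | github.com/error7404/42-Lyon-cli-matrix | Matrix.py | add_tab
-- ===== SOURCE A (Python) =====
-- def add_tab(tab1:list[str], tab2:list[str]) -> list[str]:
-- 	ret = []
-- 	t1_len = 0
-- 	t2_len = 0
-- 	for row in tab1:
-- 		t1_len = max(t1_len, len(row))
-- 	for row in tab2:
-- 		t2_len = max(t2_len, len(row))
-- 	for i in range(max(len(tab1), len(tab2))):
-- 		temp = []
-- 		for j in range(t1_len):
-- 			try:
-- 				temp.append(tab1[i][j])
-- 			except:
-- 				temp.append("0")
-- 		temp.append("-1")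
-- 		for j in range(t2_len):
-- 			try:
-- 				temp.append(tab2[i][j])
-- 			except:
-- 				temp.append("0")
-- 		ret.append(temp)
-- 	return ret
-- ===== SOURCE B (Python) =====
-- def add_tab(tab1: list[str], tab2: list[str]) -> list[str]:
--     w1 = max(map(len, tab1), default=0)
--     w2 = max(map(len, tab2), default=0)
--     n = max(len(tab1), len(tab2))
--     # start from a blank canvas of n rows: w1 zeros, the "-1" separator, w2 zeros,
--     # then stamp each input row's characters over its stretch of the canvas
--     ret = [["0"] * w1 + ["-1"] + ["0"] * w2 for _ in range(n)]
--     for i, row in enumerate(tab1):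
--         ret[i][:len(row)] = row
--     for i, row in enumerate(tab2):
--         ret[i][w1 + 1:w1 + 1 + len(row)] = row
--     return ret
-- ===== Notes on version B (the rewrite author's own statement) =====
-- stated objective: alternative
-- what changed: instead of assembling each cell in nested column loops with try/except indexing, B allocates a blank canvas of n rows (['0']*w1+['-1']+['0']*w2) and overlays each input row's characters onto its stretch of the canvas by slice assignment in two row-level passes
import Mathlib
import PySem

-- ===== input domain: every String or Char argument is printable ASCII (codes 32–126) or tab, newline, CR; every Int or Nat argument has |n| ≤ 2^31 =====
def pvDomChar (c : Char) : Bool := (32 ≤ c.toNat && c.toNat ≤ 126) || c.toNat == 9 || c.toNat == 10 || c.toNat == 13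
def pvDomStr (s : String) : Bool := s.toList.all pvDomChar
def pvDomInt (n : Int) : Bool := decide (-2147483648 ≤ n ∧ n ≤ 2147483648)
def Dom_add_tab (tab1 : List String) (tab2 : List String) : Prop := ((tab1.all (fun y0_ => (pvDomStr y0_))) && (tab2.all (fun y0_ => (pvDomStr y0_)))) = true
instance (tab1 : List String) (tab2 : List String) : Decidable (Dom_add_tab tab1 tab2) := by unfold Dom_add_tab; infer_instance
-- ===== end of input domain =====

-- B replaces A's per-cell construction (nested column loops with try/except indexing) by a
-- blank canvas of n rows (w1 zeros, "-1", w2 zeros) onto which each input row's characters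
-- are overlaid by slice assignment in two row-level passes (same cost; objective: alternative).

-- ===== PORT A =====
def add_tab (tab1 : List String) (tab2 : List String) : List (List String) :=
  let t1_len : Int := tab1.foldl (fun m row => max m (PySem.Str.len row)) 0
  let t2_len : Int := tab2.foldl (fun m row => max m (PySem.Str.len row)) 0
  (PySem.List.pyRange 0 (max (PySem.List.len tab1) (PySem.List.len tab2)) 1).foldl
    (fun ret i =>
      -- 'try: temp.append(tab1[i][j]) except: temp.append("0")': none = IndexError on either subscript
      let temp : List String := (PySem.List.pyRange 0 t1_len 1).foldl
        (fun temp j =>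
          temp ++ [(((PySem.List.pyGet? tab1 i).bind
                      (fun r => PySem.Str.pyGet? r j)).map (fun c => String.mk [c])).getD "0"]) []
      let temp := temp ++ ["-1"]
      let temp := (PySem.List.pyRange 0 t2_len 1).foldl
        (fun temp j =>
          temp ++ [(((PySem.List.pyGet? tab2 i).bind
                      (fun r => PySem.Str.pyGet? r j)).map (fun c => String.mk [c])).getD "0"]) temp
      ret ++ [temp]) []

-- ===== PORT B =====
-- 'ret[i][off:off+len(row)] = row' : splice row's characters over the canvas row at offset off
def pvStamp (canvas : List (List String)) (i : Nat) (off : Nat) (row : List Char) : List (List String) :=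
  canvas.modify i (fun old =>
    old.take off ++ row.map (fun c => String.mk [c]) ++ old.drop (off + row.length))

def add_tab_alt (tab1 : List String) (tab2 : List String) : List (List String) :=
  let w1 := (tab1.map (fun r => r.toList.length)).foldl max 0
  let w2 := (tab2.map (fun r => r.toList.length)).foldl max 0
  let n := max tab1.length tab2.length
  let ret := List.replicate n (List.replicate w1 "0" ++ ["-1"] ++ List.replicate w2 "0")
  let ret := (PySem.List.enumerate tab1 0).foldl
    (fun acc p => pvStamp acc p.1.toNat 0 p.2.toList) ret
  (PySem.List.enumerate tab2 0).foldl
    (fun acc p => pvStamp acc p.1.toNat (w1 + 1) p.2.toList) ret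

-- ===== PRECONDITION & SPEC =====
def Spec_add_tab (tab1 : List String) (tab2 : List String) (out : List (List String)) : Prop := out = add_tab_alt tab1 tab2
instance (tab1 : List String) (tab2 : List String) (out : List (List String)) : Decidable (Spec_add_tab tab1 tab2 out) := by unfold Spec_add_tab; infer_instance

-- ===== CLAIM (what is proved, stated in full; the proofs are below) =====
def Claim_equal_add_tab : Prop := ∀ (tab1 : List String) (tab2 : List String), Dom_add_tab tab1 tab2 → Spec_add_tab tab1 tab2 (add_tab tab1 tab2)

-- ===== LEMMAS AND PROOFS =====

-- the common shape both programs produce: row padded to width w with "0" cells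
def pvPad (row : List Char) (w : Nat) : List String :=
  row.map (fun c => String.mk [c]) ++ List.replicate (w - row.length) "0"

def pvW (tab : List String) : Nat := (tab.map (fun r => r.toList.length)).foldl max 0

def pvSpecRow (tab1 tab2 : List String) (j : Nat) : List String :=
  pvPad ((tab1.getD j "").toList) (pvW tab1) ++ ["-1"] ++ pvPad ((tab2.getD j "").toList) (pvW tab2)

theorem pvW_bound (tab : List String) : ∀ r ∈ tab, r.toList.length ≤ pvW tab := by
  intro r hr
  have := (PySem.List.le_foldl_max_nat tab (fun r => r.toList.length) 0).2 r hr
  simpa [pvW, List.foldl_map] using this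

theorem pvW_getD_bound (tab : List String) (j : Nat) :
    (tab.getD j "").toList.length ≤ pvW tab := by
  rcases Nat.lt_or_ge j tab.length with h | h
  · rw [List.getD_eq_getElem _ _ h]; exact pvW_bound tab _ (List.getElem_mem h)
  · rw [List.getD_eq_default _ _ h]; simp

-- ---------- A-side ----------

theorem pad_getD {α : Type} (d : α) (xs : List α) : ∀ (w : Nat), xs.length ≤ w →
    (List.range w).map (fun j => xs.getD j d) = xs ++ List.replicate (w - xs.length) d := by
  induction xs with
  | nil => intro w _; simp [List.getD]
  | cons x t ih =>
    intro w h
    cases w with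
    | zero => simp at h
    | succ w =>
      simp only [List.range_succ_eq_map, List.map_cons, List.map_map, Function.comp_def]
      have h' := ih w (by simpa using h)
      simp only [List.getD] at h' ⊢
      simp [h']

-- A's running-max width loop (Int) computes pvW (Nat)
theorem fold_len (tab : List String) : ∀ (a : Nat),
    tab.foldl (fun m row => max m (PySem.Str.len row)) (a : Int)
      = (((tab.map (fun r => r.toList.length)).foldl max a : Nat) : Int) := by
  induction tab with
  | nil => intro a; simp
  | cons r t ih =>
    intro a
    simp only [List.foldl_cons, List.map_cons]
    have hr : PySem.Str.len r = (r.toList.length : Int) := by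
      simp [PySem.Str.len_eq, String.length_toList]
    rw [hr, show max (a : Int) (r.toList.length : Int)
          = ((max a r.toList.length : Nat) : Int) by omega]
    exact ih _

-- one inner column loop of A builds exactly one padded half-row
theorem row_eq (tab : List String) (w : Nat) (hw : ∀ r ∈ tab, r.toList.length ≤ w)
    (i : Nat) (init : List String) :
    (PySem.List.pyRange 0 (w : Int) 1).foldl
      (fun temp j =>
        temp ++ [(((PySem.List.pyGet? tab (i : Int)).bind
                    (fun r => PySem.Str.pyGet? r j)).map (fun c => String.mk [c])).getD "0"]) init
      = init ++ pvPad ((tab.getD i "").toList) w := by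
  rw [PySem.List.foldl_append_singleton_eq_map]
  congr 1
  rw [PySem.List.pyRange_one]
  simp only [Int.sub_zero, Int.toNat_natCast, List.map_map, Function.comp_def, zero_add]
  rcases Nat.lt_or_ge i tab.length with hi | hi
  · have hget : PySem.List.pyGet? tab (i : Int) = some tab[i] := by
      simp [List.getElem?_eq_getElem hi]
    have hmap : ∀ k ∈ List.range w,
        ((((PySem.List.pyGet? tab (i : Int)).bind
            (fun r => PySem.Str.pyGet? r (k : Int))).map (fun c => String.mk [c])).getD "0")
          = (tab[i].toList.map (fun c => String.mk [c])).getD k "0" := by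
      intro k _
      cases hk : tab[i].toList[k]? with
      | none => simp [hget, hk, List.getD]
      | some c => simp [hget, hk, List.getD]
    rw [List.map_congr_left hmap,
        pad_getD _ _ w (by simpa using hw _ (List.getElem_mem hi)),
        List.getD_eq_getElem _ _ hi]
    simp [pvPad]
  · have hget : PySem.List.pyGet? tab (i : Int) = none := by
      simp [List.getElem?_eq_none (by omega : tab.length ≤ i)]
    have hd : tab.getD i "" = "" := List.getD_eq_default _ _ hi
    rw [hd]
    simp [hget, pvPad, show ("" : String).toList = [] from rfl]

theorem add_tab_eq_spec (tab1 tab2 : List String) :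
    add_tab tab1 tab2
      = (List.range (max tab1.length tab2.length)).map (pvSpecRow tab1 tab2) := by
  have h1 : tab1.foldl (fun m row => max m (PySem.Str.len row)) 0 = ((pvW tab1 : Nat) : Int) := by
    simpa [pvW] using fold_len tab1 0
  have h2 : tab2.foldl (fun m row => max m (PySem.Str.len row)) 0 = ((pvW tab2 : Nat) : Int) := by
    simpa [pvW] using fold_len tab2 0
  simp only [add_tab, h1, h2]
  rw [PySem.List.foldl_append_singleton_eq_map]
  simp only [List.nil_append, PySem.List.len_eq,
    show (max (tab1.length : Int) (tab2.length : Int))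
        = ((max tab1.length tab2.length : Nat) : Int) by omega]
  have houter : PySem.List.pyRange 0 ((max tab1.length tab2.length : Nat) : Int) 1
      = List.map (Nat.cast : Nat → Int) (List.range (max tab1.length tab2.length)) := by
    rw [PySem.List.pyRange_one]
    simp only [Int.sub_zero, Int.toNat_natCast]
    exact List.map_congr_left (fun k _ => zero_add _)
  rw [houter, List.map_map]
  refine List.map_congr_left (fun i _ => ?_)
  simp only [Function.comp_apply]
  rw [row_eq tab1 (pvW tab1) (pvW_bound tab1) i [], List.nil_append,
      row_eq tab2 (pvW tab2) (pvW_bound tab2) i]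
  rfl

-- ---------- B-side ----------

-- the stamping fold touches each canvas index once; element j of the result
theorem stampFold_getElem? (off : Nat) :
    ∀ (tab : List String) (k : Nat) (acc : List (List String)) (j : Nat),
    ((PySem.List.enumerate tab (k : Int)).foldl
        (fun acc p => pvStamp acc p.1.toNat off p.2.toList) acc)[j]?
      = if k ≤ j ∧ j < k + tab.length then
          acc[j]?.map (fun old =>
            old.take off ++ (tab.getD (j - k) "").toList.map (fun c => String.mk [c])
              ++ old.drop (off + (tab.getD (j - k) "").toList.length))
        else acc[j]? := by
  intro tab
  induction tab with
  | nil => intro k acc j; simp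
  | cons r t ih =>
    intro k acc j
    rw [PySem.List.enumerate_cons, List.foldl_cons,
        show ((k : Int) + 1) = ((k + 1 : Nat) : Int) by push_cast; ring]
    rw [ih (k + 1) _ j]
    have hacc : ∀ (f : List String → List String),
        (acc.modify k f)[j]? = if k = j then acc[j]?.map f else acc[j]? := by
      intro f
      rw [List.getElem?_modify]
      by_cases h : k = j
      · cases hj : acc[j]? <;> simp [h, hj]
      · cases hj : acc[j]? <;> simp [h, hj]
    by_cases hkj : k = j
    · subst hkj
      have : ¬ (k + 1 ≤ k ∧ k < k + 1 + t.length) := by omega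
      rw [if_neg this, if_pos ⟨le_refl k, by simp⟩]
      simp [pvStamp, hacc]
    · rcases Nat.lt_or_ge j (k + 1) with hj | hj
      · have h1 : ¬ (k + 1 ≤ j ∧ j < k + 1 + t.length) := by omega
        have h2 : ¬ (k ≤ j ∧ j < k + (r :: t).length) := by
          simp only [List.length_cons]; omega
        rw [if_neg h1, if_neg h2]
        simp [pvStamp, hacc, hkj]
      · have hsub : j - k = (j - (k + 1)) + 1 := by omega
        have hgd : (r :: t).getD (j - k) "" = t.getD (j - (k + 1)) "" := by
          rw [hsub, List.getD_cons_succ]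
        have hcond : (k + 1 ≤ j ∧ j < k + 1 + t.length) ↔ (k ≤ j ∧ j < k + (r :: t).length) := by
          simp only [List.length_cons]; omega
        by_cases hc : k + 1 ≤ j ∧ j < k + 1 + t.length
        · rw [if_pos hc, if_pos (hcond.mp hc), hgd]
          simp [pvStamp, hacc, hkj]
        · rw [if_neg hc, if_neg (fun h => hc (hcond.mpr h))]
          simp [pvStamp, hacc, hkj]

theorem stampFold_length (off : Nat) (tab : List String) :
    ∀ (acc : List (List String)) (k : Int),
    ((PySem.List.enumerate tab k).foldl
        (fun acc p => pvStamp acc p.1.toNat off p.2.toList) acc).length = acc.length := by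
  induction tab with
  | nil => intro acc k; simp
  | cons r t ih =>
    intro acc k
    rw [PySem.List.enumerate_cons, List.foldl_cons, ih]
    simp [pvStamp, List.length_modify]

-- stamping a row (of fitting length) at offset 0 over a blank-prefixed row
theorem stamp_fun_left (row : List Char) (w1 w2 : Nat) (h : row.length ≤ w1) :
    (fun old => old.take 0 ++ row.map (fun c => String.mk [c]) ++ old.drop (0 + row.length))
        (List.replicate w1 "0" ++ ["-1"] ++ List.replicate w2 "0")
      = pvPad row w1 ++ ["-1"] ++ List.replicate w2 "0" := by
  have hrep : List.replicate w1 ("0" : String)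
      = List.replicate row.length "0" ++ List.replicate (w1 - row.length) "0" := by
    rw [← List.replicate_add]; congr 1; omega
  simp only [List.take_zero, List.nil_append, Nat.zero_add]
  rw [hrep, List.append_assoc, List.append_assoc,
      List.drop_append_of_le_length (by simp),
      List.drop_replicate]
  simp [pvPad]

-- stamping a row (of fitting length) at offset P.length+1 behind a separator
theorem stamp_fun_right (row : List Char) (P : List String) (w2 : Nat)
    (h : row.length ≤ w2) :
    (fun old => old.take (P.length + 1) ++ row.map (fun c => String.mk [c])
        ++ old.drop (P.length + 1 + row.length))
        (P ++ ["-1"] ++ List.replicate w2 "0")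
      = P ++ ["-1"] ++ pvPad row w2 := by
  have htake : (P ++ ["-1"] ++ List.replicate w2 ("0" : String)).take (P.length + 1)
      = P ++ ["-1"] := List.take_left' (by simp)
  have hrep : List.replicate w2 ("0" : String)
      = List.replicate row.length "0" ++ List.replicate (w2 - row.length) "0" := by
    rw [← List.replicate_add]; congr 1; omega
  have hdrop : (P ++ ["-1"] ++ List.replicate w2 ("0" : String)).drop (P.length + 1 + row.length)
      = List.replicate (w2 - row.length) "0" := by
    rw [hrep, ← List.append_assoc]
    exact List.drop_left' (by simp; omega)
  simp only [htake, hdrop]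
  simp [pvPad]

theorem pvPad_length (row : List Char) (w : Nat) (h : row.length ≤ w) :
    (pvPad row w).length = w := by
  simp [pvPad]; omega

theorem add_tab_alt_eq_spec (tab1 tab2 : List String) :
    add_tab_alt tab1 tab2
      = (List.range (max tab1.length tab2.length)).map (pvSpecRow tab1 tab2) := by
  set n := max tab1.length tab2.length with hn
  set w1 := pvW tab1 with hw1
  set w2 := pvW tab2 with hw2
  set blank : List String := List.replicate w1 "0" ++ ["-1"] ++ List.replicate w2 "0" with hb
  set mid := (PySem.List.enumerate tab1 0).foldl
    (fun acc p => pvStamp acc p.1.toNat 0 p.2.toList) (List.replicate n blank) with hmid_def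
  have hAlt : add_tab_alt tab1 tab2
      = (PySem.List.enumerate tab2 0).foldl
          (fun acc p => pvStamp acc p.1.toNat (w1 + 1) p.2.toList) mid := rfl
  have hcan : ∀ j, j < n → (List.replicate n blank)[j]? = some blank := by
    intro j hj; simp [List.getElem?_replicate, hj]
  have hmid : ∀ j, j < n →
      mid[j]? = some (pvPad ((tab1.getD j "").toList) w1 ++ ["-1"] ++ List.replicate w2 "0") := by
    intro j hj
    have e1 := stampFold_getElem? 0 tab1 0 (List.replicate n blank) j
    simp only [Nat.cast_zero, Nat.sub_zero] at e1
    rw [hmid_def, e1]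
    by_cases hc : 0 ≤ j ∧ j < 0 + tab1.length
    · rw [if_pos hc, hcan j hj]
      simp only [Option.map_some]
      congr 1
      rw [hb]
      exact stamp_fun_left _ w1 w2 (by rw [hw1]; exact pvW_getD_bound tab1 j)
    · rw [if_neg hc, hcan j hj]
      congr 1
      rw [List.getD_eq_default _ _ (by omega : tab1.length ≤ j), hb]
      simp [pvPad, show ("" : String).toList = [] from rfl]
  have key : ∀ j, j < n → (add_tab_alt tab1 tab2)[j]? = some (pvSpecRow tab1 tab2 j) := by
    intro j hj
    have hPlen : (pvPad ((tab1.getD j "").toList) w1).length = w1 :=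
      pvPad_length _ _ (by rw [hw1]; exact pvW_getD_bound tab1 j)
    have e2 := stampFold_getElem? (w1 + 1) tab2 0 mid j
    simp only [Nat.cast_zero, Nat.sub_zero] at e2
    rw [hAlt, e2]
    by_cases hc : 0 ≤ j ∧ j < 0 + tab2.length
    · rw [if_pos hc, hmid j hj]
      simp only [Option.map_some]
      congr 1
      have hs := stamp_fun_right ((tab2.getD j "").toList)
        (pvPad ((tab1.getD j "").toList) w1) w2
        (by rw [hw2]; exact pvW_getD_bound tab2 j)
      rw [hPlen] at hs
      exact hs
    · rw [if_neg hc, hmid j hj]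
      congr 1
      have h2 : tab2.getD j "" = "" := List.getD_eq_default tab2 _ (by omega)
      simp only [pvSpecRow]
      rw [h2]
      simp [pvPad, ← hw1, ← hw2, show ("" : String).toList = [] from rfl]
  have hlen : (add_tab_alt tab1 tab2).length = n := by
    rw [hAlt, stampFold_length, hmid_def, stampFold_length, List.length_replicate]
  apply List.ext_getElem?
  intro j
  rcases Nat.lt_or_ge j n with hj | hj
  · rw [key j hj, List.getElem?_map, List.getElem?_range hj]
    rfl
  · rw [List.getElem?_eq_none (by omega : (add_tab_alt tab1 tab2).length ≤ j),
        List.getElem?_eq_none (by simpa using hj)]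

-- ===== VERDICT (by name: the statement is the Claim_ definition above) =====
theorem add_tab_spec : Claim_equal_add_tab := by
  intro tab1 tab2 _
  show add_tab tab1 tab2 = add_tab_alt tab1 tab2
  rw [add_tab_eq_spec, add_tab_alt_eq_spec]
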